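-- pv_equiv track=rewrite | github.com/Samson96h/home_work | home.py | longest_word_let
-- ===== SOURCE A (Python) =====
-- def longest_word_let (mstr):
--     ml = mstr.split()
--     ml.sort(key = len)
--     el = ""
--     nc = 0
--     word = ml[-1]
--     for i in word.lower():
--         coun = word.count(i)
--         if coun > nc:
--             nc = coun
--             el = i
--     return el
-- ===== SOURCE B (Python) =====
-- def longest_word_let(mstr):
--     words = mstr.split()
--     best = words[0]
--     for w in words[1:]:
--         if len(w) >= len(best):
--             best = w
--     cnt = {}
--     for c in best:
--         cnt[c] = cnt.get(c, 0) + 1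
--     el = ""
--     nc = 0
--     for ch in best.lower():
--         c = cnt.get(ch, 0)
--         if c > nc:
--             nc = c
--             el = ch
--     return el
-- ===== Notes on version B (the rewrite author's own statement) =====
-- stated objective: faster
-- what changed: Replaces the sort-then-take-last with a single linear scan for the longest word (>= keeps the last max, matching the stable sort), and replaces the repeated word.count(ch) inner scans with one frequency dictionary built in a single pass over the word.
import Mathlib
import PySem

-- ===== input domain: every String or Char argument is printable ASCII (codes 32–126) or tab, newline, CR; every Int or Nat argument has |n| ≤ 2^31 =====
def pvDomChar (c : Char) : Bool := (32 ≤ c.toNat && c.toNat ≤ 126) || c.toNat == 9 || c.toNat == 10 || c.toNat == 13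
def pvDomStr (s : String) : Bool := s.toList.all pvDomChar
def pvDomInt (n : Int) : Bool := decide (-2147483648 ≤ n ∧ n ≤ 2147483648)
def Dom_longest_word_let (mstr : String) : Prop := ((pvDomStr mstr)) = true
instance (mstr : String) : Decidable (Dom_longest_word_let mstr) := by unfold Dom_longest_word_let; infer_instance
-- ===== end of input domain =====

-- B replaces A's stable sort by a single linear scan for the last longest word, and A's
-- repeated word.count inner scans by one frequency dictionary built in a single pass.

-- ===== PORT A =====
def longest_word_let (mstr : String) : String :=
  let ml := PySem.Str.split₀ mstr
  let ml := PySem.List.sorted ml (fun w => PySem.Str.len w) false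
  let word := (PySem.List.pyGet? ml (-1)).getD ""   -- ml[-1]; none = IndexError, excluded by Pre_
  ((PySem.Str.lower word).toList.foldl
    (fun (p : String × Int) i =>
      let coun : Int := PySem.Str.count word (String.ofList [i])
      if coun > p.2 then (String.ofList [i], coun) else p) ("", 0)).1

-- ===== PORT B =====
def longest_word_let_alt (mstr : String) : String :=
  let words := PySem.Str.split₀ mstr
  match words with
  | [] => ""   -- words[0] = IndexError in Python, excluded by Pre_
  | w0 :: rest =>
    let best := rest.foldl (fun b w => if PySem.Str.len b ≤ PySem.Str.len w then w else b) w0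
    let cnt := best.toList.foldl (fun d c => d.insert c (d.getD c 0 + 1))
      (PySem.Dict.empty : PySem.Dict Char Int)
    ((PySem.Str.lower best).toList.foldl
      (fun (p : String × Int) ch =>
        let c := cnt.getD ch 0
        if c > p.2 then (String.ofList [ch], c) else p) ("", 0)).1

-- ===== PRECONDITION & SPEC =====
-- Pre_ excludes exactly the inputs with no word (whitespace-only / empty string),
-- on which both A and B raise IndexError.
def Pre_longest_word_let (mstr : String) : Prop := PySem.Str.split₀ mstr ≠ []
instance (mstr : String) : Decidable (Pre_longest_word_let mstr) := by
  unfold Pre_longest_word_let; infer_instance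
def pvWitness_longest_word_let : String := "hello worlds"

def Spec_longest_word_let (mstr : String) (out : String) : Prop := out = longest_word_let_alt mstr
instance (mstr : String) (out : String) : Decidable (Spec_longest_word_let mstr out) := by
  unfold Spec_longest_word_let; infer_instance

-- ===== CLAIM (what is proved, stated in full; the proofs are below) =====
def Claim_equal_longest_word_let : Prop := ∀ (mstr : String), Dom_longest_word_let mstr → Pre_longest_word_let mstr → Spec_longest_word_let mstr (longest_word_let mstr)

-- ===== LEMMAS AND PROOFS =====

-- Chars.count.go with a single-character needle counts occurrences of that character.
theorem pv_count_go_single (c : Char) :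
    ∀ (s : List Char) (fuel acc : Nat), s.length ≤ fuel →
      PySem.Chars.count.go [c] fuel s acc = acc + s.count c := by
  intro s
  induction s with
  | nil =>
    intro fuel acc _
    cases fuel <;> simp [List.count_nil] <;> rfl
  | cons h t ih =>
    intro fuel acc hle
    cases fuel with
    | zero => simp at hle
    | succ n =>
      rw [show PySem.Chars.count.go [c] (n+1) (h::t) acc =
            if [c].isPrefixOf (h::t) then PySem.Chars.count.go [c] n t (acc+1)
            else PySem.Chars.count.go [c] n t acc from rfl]
      have hlen : t.length ≤ n := by simpa using hle
      by_cases hc : c = h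
      · subst hc
        simp only [List.isPrefixOf, beq_self_eq_true, Bool.true_and,
          if_true, ih n (acc+1) hlen]
        simp
        omega
      · have : ([c].isPrefixOf (h::t)) = false := by
          simp [List.isPrefixOf]; exact fun hh => absurd hh hc
        rw [this]
        simp only [Bool.false_eq_true, if_false, ih n acc hlen]
        have hne : (h == c) = false := by
          simp only [beq_eq_false_iff_ne, ne_eq]
          exact fun hh => hc hh.symm
        simp [List.count_cons, hne]

theorem pv_count_single (s : String) (c : Char) :
    PySem.Str.count s (String.ofList [c]) = s.toList.count c := by
  rw [PySem.Str.count_eq]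
  have h : (String.ofList [c]).toList = [c] := by simp
  rw [h]
  show (if ([c] : List Char).isEmpty then s.toList.length + 1
        else PySem.Chars.count.go [c] s.toList.length s.toList 0) = _
  simp only [List.isEmpty_cons, Bool.false_eq_true, if_false]
  simpa using pv_count_go_single c s.toList s.toList.length 0 le_rfl

-- insertBy produces a nonempty list.
theorem pv_insertBy_ne_nil {α : Type} (bef : α → α → Bool) (x : α) (l : List α) :
    PySem.List.insertBy bef x l ≠ [] := by
  cases l with
  | nil => simp [PySem.List.insertBy]
  | cons y ys =>
    simp only [PySem.List.insertBy]
    split <;> simp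

theorem pv_mem_insertBy {α : Type} (bef : α → α → Bool) (x a : α) :
    ∀ (l : List α), a ∈ PySem.List.insertBy bef x l → a = x ∨ a ∈ l := by
  intro l
  induction l with
  | nil => simp [PySem.List.insertBy]
  | cons y ys ih =>
    simp only [PySem.List.insertBy]
    split
    · intro h
      simp at h
      rcases h with h | h | h <;> simp [h]
    · intro h
      simp at h
      rcases h with h | h
      · right; simp [h]
      · rcases ih h with h' | h'
        · left; exact h'
        · right; simp [h']

theorem pv_pairwise_insertBy (x : String) :
    ∀ (l : List String),
      l.Pairwise (fun a b => PySem.Str.len a ≤ PySem.Str.len b) →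
      (PySem.List.insertBy (fun a b => decide (PySem.Str.len a < PySem.Str.len b)) x l).Pairwise
        (fun a b => PySem.Str.len a ≤ PySem.Str.len b) := by
  intro l
  induction l with
  | nil => simp [PySem.List.insertBy]
  | cons y ys ih =>
    intro hp
    rcases List.pairwise_cons.mp hp with ⟨hy, hys⟩
    simp only [PySem.List.insertBy]
    split
    · rename_i hlt
      rw [decide_eq_true_iff] at hlt
      refine List.pairwise_cons.mpr ⟨?_, hp⟩
      intro z hz
      rcases List.mem_cons.mp hz with rfl | hz'
      · exact le_of_lt hlt
      · exact le_trans (le_of_lt hlt) (hy z hz')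
    · rename_i hnlt
      rw [decide_eq_true_iff] at hnlt
      rw [not_lt] at hnlt
      refine List.pairwise_cons.mpr ⟨?_, ih hys⟩
      intro z hz
      rcases pv_mem_insertBy _ x z _ hz with rfl | hz'
      · exact hnlt
      · exact hy z hz'

theorem pv_getLast?_insertBy (x : String) :
    ∀ (l : List String),
      l.Pairwise (fun a b => PySem.Str.len a ≤ PySem.Str.len b) →
      (PySem.List.insertBy (fun a b => decide (PySem.Str.len a < PySem.Str.len b)) x l).getLast? =
        some (match l.getLast? with
              | none => x
              | some b => if PySem.Str.len b ≤ PySem.Str.len x then x else b) := by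
  intro l
  induction l with
  | nil => simp [PySem.List.insertBy]
  | cons y ys ih =>
    intro hp
    rcases List.pairwise_cons.mp hp with ⟨hy, hys⟩
    simp only [PySem.List.insertBy]
    split
    · rename_i hlt
      rw [decide_eq_true_iff] at hlt
      obtain ⟨b, hbe⟩ : ∃ b, (y :: ys).getLast? = some b := by
        cases hg : (y :: ys).getLast? with
        | none => simp at hg
        | some b => exact ⟨b, rfl⟩
      have hble : ¬ PySem.Str.len b ≤ PySem.Str.len x := by
        have hbmem : b ∈ y :: ys := List.mem_of_getLast? hbe
        rcases List.mem_cons.mp hbmem with rfl | hb'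
        · omega
        · have := hy b hb'; omega
      rw [List.getLast?_cons_cons, hbe]
      have hble' : ¬ b.length ≤ x.length := by simpa [PySem.Str.len] using hble
      simp [hble']
    · rename_i hnlt
      rw [decide_eq_true_iff] at hnlt
      rw [not_lt] at hnlt
      cases ys with
      | nil =>
        rw [show PySem.List.insertBy (fun a b => decide (PySem.Str.len a < PySem.Str.len b)) x
              ([] : List String) = [x] from rfl]
        have hnlt' : y.length ≤ x.length := by simpa [PySem.Str.len] using hnlt
        simp [Nat.not_lt.mpr hnlt']
      | cons z zs =>
        have hne := pv_insertBy_ne_nil (fun a b => decide (PySem.Str.len a < PySem.Str.len b)) x (z :: zs)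
        rw [List.getLast?_cons_cons]
        cases hg : PySem.List.insertBy (fun a b => decide (PySem.Str.len a < PySem.Str.len b)) x (z :: zs) with
        | nil => exact absurd hg hne
        | cons u us =>
          have h2 := ih hys
          rw [hg] at h2
          rw [List.getLast?_cons_cons]
          exact h2

theorem pv_fold_last :
    ∀ (l acc : List String) (b : String),
      acc.Pairwise (fun a b => PySem.Str.len a ≤ PySem.Str.len b) →
      acc.getLast? = some b →
      (l.foldl (fun a x => PySem.List.insertBy (fun a b => decide (PySem.Str.len a < PySem.Str.len b)) x a) acc).getLast? =
        some (l.foldl (fun c w => if PySem.Str.len c ≤ PySem.Str.len w then w else c) b) := by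
  intro l
  induction l with
  | nil => intro acc b _ hb; simpa using hb
  | cons w ws ih =>
    intro acc b hp hb
    simp only [List.foldl_cons]
    have hp' := pv_pairwise_insertBy w acc hp
    have hl := pv_getLast?_insertBy w acc hp
    rw [hb] at hl
    exact ih _ _ hp' hl

-- ===== VERDICT (by name: the statement is the Claim_ definition above) =====
theorem longest_word_let_spec : Claim_equal_longest_word_let := by
  intro mstr _ hpre
  show longest_word_let mstr = longest_word_let_alt mstr
  cases hsplit : PySem.Str.split₀ mstr with
  | nil => exact absurd hsplit hpre
  | cons w0 rest =>
    -- the longest word A extracts is B's linearly-scanned best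
    have hsorted :
        (PySem.List.sorted (w0 :: rest) (fun w => PySem.Str.len w) false).getLast? =
          some (rest.foldl (fun c w => if PySem.Str.len c ≤ PySem.Str.len w then w else c) w0) := by
      rw [show PySem.List.sorted (w0 :: rest) (fun w => PySem.Str.len w) false =
            rest.foldl (fun a x =>
              PySem.List.insertBy (fun a b => decide (PySem.Str.len a < PySem.Str.len b)) x a) [w0]
          from rfl]
      exact pv_fold_last rest [w0] w0 (by simp) (by simp)
    simp only [longest_word_let, longest_word_let_alt, hsplit, PySem.List.pyGet?_neg_one,
      hsorted, Option.getD_some]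
    set best := rest.foldl (fun c w => if PySem.Str.len c ≤ PySem.Str.len w then w else c) w0 with hbest
    have hcnt : ∀ ch : Char,
        (best.toList.foldl (fun d c => d.insert c (d.getD c 0 + 1))
            (PySem.Dict.empty : PySem.Dict Char Int)).getD ch 0
          = ((PySem.Str.count best (String.ofList [ch]) : Nat) : Int) := by
      intro ch
      rw [PySem.Dict.getD_foldl_insert_add_one, pv_count_single]
      simp
    simp only [hcnt]
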